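-- pv_equiv track=rewrite | github.com/AltoPelago/aeon | implementations/python/src/aeon/parser.py | normalize_leading_indent
-- ===== SOURCE A (Python) =====
-- def normalize_leading_indent(line: str, tab_width: int) -> str:
--     index = 0
--     prefix: list[str] = []
--     while index < len(line):
--         char = line[index]
--         if char == " ":
--             prefix.append(" ")
--             index += 1
--             continue
--         if char == "\t":
--             prefix.append(" " * tab_width)
--             index += 1
--             continue
--         break
--     return "".join(prefix) + line[index:]
-- ===== SOURCE B (Python) =====
-- def normalize_leading_indent(line: str, tab_width: int) -> str:
--     end = 0
--     while end < len(line) and line[end] in " \t":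
--         end += 1
--     prefix = line[:end]
--     if "\t" in prefix:
--         prefix = prefix.replace("\t", " " * tab_width)
--     return prefix + line[end:]
-- ===== Notes on version B (the rewrite author's own statement) =====
-- stated objective: idiomatic
-- what changed: Instead of a char-by-char loop appending expanded pieces to a list, B finds the end of the leading whitespace run and expands all its tabs with a single batch str.replace on that prefix.
import Mathlib
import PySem

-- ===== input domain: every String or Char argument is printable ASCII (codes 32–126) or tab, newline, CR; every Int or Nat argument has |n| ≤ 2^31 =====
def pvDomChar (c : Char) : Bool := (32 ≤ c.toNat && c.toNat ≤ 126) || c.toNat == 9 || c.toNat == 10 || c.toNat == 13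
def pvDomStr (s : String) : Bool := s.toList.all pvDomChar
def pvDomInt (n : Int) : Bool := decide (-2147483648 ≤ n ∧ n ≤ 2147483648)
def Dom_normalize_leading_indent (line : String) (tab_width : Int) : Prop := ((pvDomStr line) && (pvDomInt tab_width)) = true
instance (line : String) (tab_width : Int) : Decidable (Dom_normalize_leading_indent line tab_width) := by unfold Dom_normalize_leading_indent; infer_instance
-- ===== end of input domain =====

-- B replaces A's char-by-char list-building loop by: find the boundary of the leading
-- whitespace run, then expand its tabs with one batch str.replace on that prefix (idiomatic).

-- ===== PORT A =====
-- A's while loop: walks the string, appending " " or " "*tab_width to `prefix`,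
-- breaks at the first other char; returns join(prefix) + rest.
def nliGo (tw : Int) : List Char → List (List Char) → List Char
  | [], acc => acc.flatten
  | c :: rest, acc =>
    if c = ' ' then nliGo tw rest (acc ++ [[' ']])
    else if c = '\t' then nliGo tw rest (acc ++ [PySem.List.pyRepeat [' '] tw])
    else acc.flatten ++ (c :: rest)

def normalize_leading_indent (line : String) (tab_width : Int) : String :=
  String.mk (nliGo tab_width line.toList [])

-- ===== PORT B =====
-- while end < len(line) and line[end] in " \t": end += 1
def nliScan : List Char → Nat
  | [] => 0
  | c :: rest => if c = ' ' || c = '\t' then nliScan rest + 1 else 0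

-- prefix = line[:end]; if "\t" in prefix: prefix = prefix.replace("\t", " " * tab_width)
def normalize_leading_indent_alt (line : String) (tab_width : Int) : String :=
  let cs := line.toList
  let e := nliScan cs
  let pre := cs.take e
  let pre := if PySem.Chars.isIn ['\t'] pre then
      PySem.Chars.replace pre ['\t'] (PySem.List.pyRepeat [' '] tab_width)
    else pre
  String.mk (pre ++ cs.drop e)

-- ===== PRECONDITION & SPEC =====
def Spec_normalize_leading_indent (line : String) (tab_width : Int) (out : String) : Prop := out = normalize_leading_indent_alt line tab_width
instance (line : String) (tab_width : Int) (out : String) : Decidable (Spec_normalize_leading_indent line tab_width out) := by unfold Spec_normalize_leading_indent; infer_instance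

-- ===== CLAIM =====
def Claim_equal_normalize_leading_indent : Prop := ∀ (line : String) (tab_width : Int), Dom_normalize_leading_indent line tab_width → Spec_normalize_leading_indent line tab_width (normalize_leading_indent line tab_width)

-- ===== LEMMAS AND PROOFS =====

-- str.replace with a single-char needle is a flatMap substitution
theorem replace_go_single (o : Char) (new : List Char) (l acc : List Char) (fuel : Nat)
    (h : l.length ≤ fuel) :
    PySem.Chars.replace.go [o] new fuel l acc
      = acc.reverse ++ l.flatMap (fun c => if c = o then new else [c]) := by
  induction l generalizing fuel acc with
  | nil => cases fuel <;> simp [PySem.Chars.replace.go]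
  | cons c t ih =>
    cases fuel with
    | zero => simp at h
    | succ f =>
      have h' : t.length ≤ f := by simpa using h
      rw [show PySem.Chars.replace.go [o] new (f+1) (c::t) acc =
            (if [o].isPrefixOf (c::t) = true then
               PySem.Chars.replace.go [o] new f (List.drop 1 (c::t)) (new.reverse ++ acc)
             else PySem.Chars.replace.go [o] new f t (c :: acc)) from rfl]
      by_cases hc : c = o
      · rw [if_pos (by simp [List.isPrefixOf, hc])]
        simp only [List.drop_succ_cons, List.drop_zero]
        rw [ih _ _ h']
        simp [hc]
      · rw [if_neg (by simp [List.isPrefixOf]; exact fun e => hc e.symm)]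
        rw [ih _ _ h']
        simp [hc]

theorem replace_single (o : Char) (new : List Char) (l : List Char) :
    PySem.Chars.replace l [o] new = l.flatMap (fun c => if c = o then new else [c]) := by
  rw [show PySem.Chars.replace l [o] new =
        PySem.Chars.replace.go [o] new l.length l [] from rfl,
    replace_go_single o new l [] l.length le_rfl]
  simp

theorem nliGo_acc (tw : Int) (cs : List Char) (acc : List (List Char)) :
    nliGo tw cs acc = acc.flatten ++ nliGo tw cs [] := by
  induction cs generalizing acc with
  | nil => simp [nliGo]
  | cons c rest ih =>
    by_cases h1 : c = ' '
    · simp only [nliGo]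
      rw [if_pos h1, ih, if_pos h1, List.nil_append, ih [[' ']]]
      simp
    · by_cases h2 : c = '\t'
      · simp only [nliGo]
        rw [if_neg h1, if_pos h2, ih (acc ++ [PySem.List.pyRepeat [' '] tw])]
        conv_rhs => rw [if_neg h1, if_pos h2, List.nil_append, ih [PySem.List.pyRepeat [' '] tw]]
        simp
      · simp [nliGo, h1, h2]

theorem nliGo_eq_alt (tw : Int) (cs : List Char) :
    nliGo tw cs []
      = (cs.take (nliScan cs)).flatMap
          (fun c => if c = '\t' then PySem.List.pyRepeat [' '] tw else [c])
        ++ cs.drop (nliScan cs) := by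
  induction cs with
  | nil => simp [nliGo, nliScan]
  | cons c rest ih =>
    by_cases h1 : c = ' '
    · have hs : nliScan (c :: rest) = nliScan rest + 1 := by simp [nliScan, h1]
      simp only [nliGo]
      rw [if_pos h1, nliGo_acc, hs, ih]
      simp [h1]
    · by_cases h2 : c = '\t'
      · have hs : nliScan (c :: rest) = nliScan rest + 1 := by simp [nliScan, h2]
        simp only [nliGo]
        rw [if_neg h1, if_pos h2, nliGo_acc, hs, ih]
        simp [h2]
      · have hs : nliScan (c :: rest) = 0 := by simp [nliScan, h1, h2]
        simp [nliGo, h1, h2, hs]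

-- ===== VERDICT =====
theorem normalize_leading_indent_spec : Claim_equal_normalize_leading_indent := by
  intro line tw _
  unfold Spec_normalize_leading_indent normalize_leading_indent normalize_leading_indent_alt
  simp only []
  by_cases ht : PySem.Chars.isIn ['\t'] (line.toList.take (nliScan line.toList)) = true
  · rw [if_pos ht, replace_single, nliGo_eq_alt]
  · rw [if_neg ht, nliGo_eq_alt]
    have hno : '\t' ∉ line.toList.take (nliScan line.toList) := by
      intro hm
      exact ht ((PySem.Chars.isIn_iff_infix _ _).mpr ((List.singleton_infix_iff _ _).mpr hm))
    congr 1
    rw [List.flatMap_congr (g := fun c => [c]) (fun c hc => by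
      rw [if_neg (by rintro rfl; exact hno hc)])]
    simp
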